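-- pv_equiv track=rewrite | github.com/jacksonfellows/euler | python/204_Generalised_Hamming_Numbers.py | hammings_under
-- ===== SOURCE A (Python) =====
-- def hammings_under(primes, lim, n):
--     if len(primes) == 0:
--         return 1
--     p = primes[0]
--     S = 0
--     for k in range(lim):
--         n_ = n*p**k
--         if n_ > lim:
--             break
--         S += hammings_under(primes[1:], lim, n_)
--     return S
-- ===== SOURCE B (Python) =====
-- def hammings_under(primes, lim, n):
--     # Iterative worklist instead of recursion: expand the set of partial
--     # products prime by prime; keeps A's range(lim) cap on the per-prime
--     # exponent so the enumeration is bounded for any integer inputs.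
--     results = [n]
--     for p in primes:
--         new = []
--         for x in results:
--             v = x
--             for _ in range(lim):
--                 if v > lim:
--                     break
--                 new.append(v)
--                 v *= p
--         results = new
--     return len(results)
-- ===== Notes on version B (the rewrite author's own statement) =====
-- stated objective: alternative
-- what changed: Replaces the recursive depth-first summation over primes[1:] with an iterative breadth-first worklist that carries the explicit list of all partial products <= lim prime by prime and returns its length (keeping A's range(lim) exponent cap so it terminates on any integer input).
import Mathlib
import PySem

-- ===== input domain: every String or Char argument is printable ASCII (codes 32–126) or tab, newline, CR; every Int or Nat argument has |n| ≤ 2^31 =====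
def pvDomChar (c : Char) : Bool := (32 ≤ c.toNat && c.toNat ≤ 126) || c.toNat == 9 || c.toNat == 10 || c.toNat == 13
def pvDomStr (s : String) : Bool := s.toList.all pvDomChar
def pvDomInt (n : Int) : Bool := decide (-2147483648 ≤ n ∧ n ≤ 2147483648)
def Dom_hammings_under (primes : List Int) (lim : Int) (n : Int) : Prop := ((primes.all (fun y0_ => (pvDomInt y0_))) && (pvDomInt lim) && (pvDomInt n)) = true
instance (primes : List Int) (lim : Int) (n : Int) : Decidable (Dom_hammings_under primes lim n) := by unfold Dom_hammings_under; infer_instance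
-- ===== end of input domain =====

-- B replaces A's recursive depth-first summation with an iterative breadth-first
-- worklist of partial products (same cost, different algorithm); equivalence is total.


-- ===== PORT A =====
-- A's 'for k in range(lim)' loop with break: fuel = remaining iterations,
-- k = current exponent, n_ = n*p**k computed afresh each round as in the Python.
def hammingsALoop (hrest : Int → Int) (p lim n : Int) : Nat → Nat → Int
  | _, 0 => 0
  | k, f + 1 =>
    let n_ := n * p ^ k
    if n_ > lim then 0 else hrest n_ + hammingsALoop hrest p lim n (k + 1) f

def hammings_under : List Int → Int → Int → Int
  | [], _, _ => 1
  | p :: rest, lim, n =>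
    hammingsALoop (fun n_ => hammings_under rest lim n_) p lim n 0 lim.toNat

-- ===== PORT B =====
-- B's inner 'for _ in range(lim): if v > lim: break; new.append(v); v *= p'
def hammingsExpand (p lim : Int) : Nat → Int → List Int
  | 0, _ => []
  | f + 1, v => if v > lim then [] else v :: hammingsExpand p lim f (v * p)

def hammings_under_alt (primes : List Int) (lim : Int) (n : Int) : Int :=
  let results := primes.foldl
    (fun results p => results.foldl (fun new x => new ++ hammingsExpand p lim lim.toNat x) []) [n]
  (results.length : Int)

-- ===== PRECONDITION & SPEC =====
def Spec_hammings_under (primes : List Int) (lim : Int) (n : Int) (out : Int) : Prop := out = hammings_under_alt primes lim n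
instance (primes : List Int) (lim : Int) (n : Int) (out : Int) : Decidable (Spec_hammings_under primes lim n out) := by unfold Spec_hammings_under; infer_instance

-- ===== CLAIM (what is proved, stated in full; the proofs are below) =====
def Claim_equal_hammings_under : Prop := ∀ (primes : List Int) (lim : Int) (n : Int), Dom_hammings_under primes lim n → Spec_hammings_under primes lim n (hammings_under primes lim n)

-- ===== LEMMAS AND PROOFS =====

-- A's inner loop equals the sum of the recursive call over B's expansion list.
theorem aLoop_eq_sum (hrest : Int → Int) (p lim n : Int) :
    ∀ (f k : Nat),
      hammingsALoop hrest p lim n k f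
        = ((hammingsExpand p lim f (n * p ^ k)).map hrest).sum := by
  intro f
  induction f with
  | zero => intro k; simp [hammingsALoop, hammingsExpand]
  | succ f ih =>
    intro k
    simp only [hammingsALoop, hammingsExpand]
    by_cases h : n * p ^ k > lim
    · simp [h]
    · have : n * p ^ k * p = n * p ^ (k + 1) := by ring
      simp [h, this, ih (k + 1)]

-- the iterated worklist length equals the sum of A over the worklist
theorem foldl_len_eq_sum (lim : Int) :
    ∀ (primes : List Int) (xs : List Int),
      (((primes.foldl
          (fun results p =>
            results.foldl (fun new x => new ++ hammingsExpand p lim lim.toNat x) []) xs).length : Int))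
        = ((xs.map (fun x => hammings_under primes lim x)).sum) := by
  intro primes
  induction primes with
  | nil =>
    intro xs
    simp [hammings_under]
  | cons p rest ih =>
    intro xs
    simp only [List.foldl_cons]
    rw [PySem.List.foldl_append_eq_flatMap, List.nil_append, ih]
    induction xs with
    | nil => simp
    | cons y ys ihx =>
      simp only [List.flatMap_cons, List.map_append, List.sum_append, List.map_cons, List.sum_cons, ihx]
      congr 1
      show _ = hammings_under (p :: rest) lim y
      rw [show hammings_under (p :: rest) lim y
            = hammingsALoop (fun n_ => hammings_under rest lim n_) p lim y 0 lim.toNat from rfl,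
          aLoop_eq_sum]
      simp

-- ===== VERDICT (by name: the statement is the Claim_ definition above) =====
theorem hammings_under_spec : Claim_equal_hammings_under := by
  intro primes lim n _
  show hammings_under primes lim n = hammings_under_alt primes lim n
  rw [hammings_under_alt]
  rw [foldl_len_eq_sum lim primes [n]]
  simp
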